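-- pv_equiv track=rewrite | github.com/IscoSoto/Tarea1LunaTrujillo | metodos.py | verify_array_op
-- ===== SOURCE A (Python) =====
-- import math
--
-- def multiple_op(X):
--     # Inicio del método.
--     if type(X) == int and X >= 0:
--         # Ejecuta el siguiente código si el valor ingresado al método
--         # es un número entero positivo (o 0).
--         a = X * X
--         # Operación 1 del método, multiplica el valor ingresado por sí mismo.
--         b = 2 ** X
--         # Operación 2 del método, eleva 2 al valor ingresado.
--         c = math.factorial(X)
--         # Operación 3 del método, calcula el factorial del valor ingresado.
--         array = []
--         # Se crea un array inicialmente vacío.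
--         array.append(a)
--         # Se agrega el resultado de la operación 1 al array.
--         array.append(b)
--         # Se agrega el resultado de la operación 2 al array.
--         array.append(c)
--         # Se agrega el resultado de la operación 3 al array.
--         return array
--     # Devuelve un array con los resultados de las 3 operaciones.
--     else:
--         # Si el valor ingresado no cumple las condiciones
--         # definidas anteriormente, ejecuta el siguiente código.
--         return "E-303: Error en tipo de dato ingresado."
--
-- def verify_array_op(array):
--     # Inicio del método.
--     k = []
--     # Define un array vacío k, que será usado
--     # para guardar el resultado final del método.
--     for X in array:
--         # Ejecuta el siguiente código por
--         # cada elemento dentro del array de entrada.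
--         if type(X) == int and X >= 0:
--             # Si se cumple que el elemento es un número entero positivo
--             # (o cero), ejecuta el siguiente código.
--             a_int = multiple_op(X)
--             # Lleva a cabo el método multiple_op con un número del array,
--             # y guarda el resultado en la variable a_int.
--             k.append(a_int)
--             # Agrega el array obtenido en a_int al array
--             # k definido anteriormente.
--         else:
--             # En caso de que el elemento no sea un un número entero positivo
--             # (o cero), se ejecuta el siguiente código.
--             return "E-304: Error en tipo de dato ingresado dentro del array."
--         # Retorna un mensaje de error.
--     return k
-- ===== SOURCE B (Python) =====
-- import math
--
-- def multiple_op(X):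
--     if type(X) == int and X >= 0:
--         return [X * X, 2 ** X, math.factorial(X)]
--     else:
--         return "E-303: Error en tipo de dato ingresado."
--
-- def verify_array_op(array):
--     # Column-wise construction: validate, then build each operation's column
--     # in its own pass and transpose the columns into rows with zip.
--     if any(not (type(X) == int and X >= 0) for X in array):
--         return "E-304: Error en tipo de dato ingresado dentro del array."
--     squares = [X * X for X in array]
--     powers = [2 ** X for X in array]
--     facts = [math.factorial(X) for X in array]
--     return [list(row) for row in zip(squares, powers, facts)]
-- ===== Notes on version B (the rewrite author's own statement) =====
-- stated objective: alternative
-- what changed: A builds the result row by row in one interleaved validate-and-append loop with early return; B validates once, then computes the three operation columns (squares, powers of two, factorials) as separate whole-array passes and transposes them into rows with zip.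
import Mathlib
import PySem

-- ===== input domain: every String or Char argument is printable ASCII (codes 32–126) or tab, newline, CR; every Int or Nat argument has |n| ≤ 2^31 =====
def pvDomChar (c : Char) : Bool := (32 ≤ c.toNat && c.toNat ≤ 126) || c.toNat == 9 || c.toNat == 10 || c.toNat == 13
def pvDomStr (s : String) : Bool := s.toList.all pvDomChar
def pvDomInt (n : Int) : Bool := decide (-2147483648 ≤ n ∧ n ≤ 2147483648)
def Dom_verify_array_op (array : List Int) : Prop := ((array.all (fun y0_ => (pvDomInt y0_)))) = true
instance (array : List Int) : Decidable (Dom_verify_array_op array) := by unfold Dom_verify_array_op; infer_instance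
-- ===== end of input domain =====

-- B replaces A's interleaved validate-and-append row loop by a one-pass validation followed by
-- column-wise construction (three separate map passes: squares, powers of two, factorials)
-- transposed into rows with zip (objective: alternative). On arrays containing a negative
-- element both Pythons return an error STRING, not a list of the declared return type;
-- Pre_ excludes exactly those inputs.

-- ===== PORT A =====
-- multiple_op: builds [X*X, 2**X, X!] by successive appends (Python returns an error string
-- on negative X; that branch is unreachable under the caller's guard / Pre_, ported as []).
def multipleOpA (X : Int) : List Int :=
  if X ≥ 0 then
    let a := X * X
    let b := (2 : Int) ^ X.toNat
    let c := (Nat.factorial X.toNat : Int)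
    let array : List Int := []
    let array := array ++ [a]
    let array := array ++ [b]
    let array := array ++ [c]
    array
  else []  -- Python: error string "E-303…", not a List Int; unreachable under Pre_

-- A's loop: accumulate k, early-return the error string on a negative element.
def verifyLoopA (k : List (List Int)) : List Int → List (List Int)
  | [] => k
  | X :: rest =>
      if X ≥ 0 then
        verifyLoopA (k ++ [multipleOpA X]) rest
      else []  -- Python: returns error string "E-304…", not a List (List Int); outside Pre_

def verify_array_op (array : List Int) : List (List Int) :=
  verifyLoopA [] array

-- ===== PORT B =====
-- Python's zip over three equal-length columns, each row materialised as a list.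
def zip3Rows : List Int → List Int → List Int → List (List Int)
  | a :: as_, b :: bs, c :: cs => [a, b, c] :: zip3Rows as_ bs cs
  | _, _, _ => []

def verify_array_op_alt (array : List Int) : List (List Int) :=
  if array.any (fun X => !(X ≥ 0)) then []  -- Python: error string "E-304…"; outside Pre_
  else
    let squares := array.map (fun X => X * X)
    let powers := array.map (fun X => (2 : Int) ^ X.toNat)
    let facts := array.map (fun X => (Nat.factorial X.toNat : Int))
    zip3Rows squares powers facts

-- ===== PRECONDITION & SPEC =====
-- Pre_ excludes arrays with a negative element: there both Pythons return an error string,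
-- which is not a value of the declared return type List (List Int).
def Pre_verify_array_op (array : List Int) : Prop := ∀ x ∈ array, 0 ≤ x
instance (array : List Int) : Decidable (Pre_verify_array_op array) := by unfold Pre_verify_array_op; infer_instance

def pvWitness_verify_array_op : List Int := [0, 1, 2, 5]

def Spec_verify_array_op (array : List Int) (out : List (List Int)) : Prop := out = verify_array_op_alt array
instance (array : List Int) (out : List (List Int)) : Decidable (Spec_verify_array_op array out) := by unfold Spec_verify_array_op; infer_instance

-- ===== CLAIM =====
def Claim_equal_verify_array_op : Prop := ∀ (array : List Int), Dom_verify_array_op array → Pre_verify_array_op array → Spec_verify_array_op array (verify_array_op array)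

-- ===== LEMMAS AND PROOFS =====
-- Transposing three mapped columns of the same list yields the per-element rows.
theorem zip3Rows_map (f g h : Int → Int) (xs : List Int) :
    zip3Rows (xs.map f) (xs.map g) (xs.map h) = xs.map (fun x => [f x, g x, h x]) := by
  induction xs with
  | nil => simp [zip3Rows]
  | cons x rest ih => simp [zip3Rows, ih]

theorem verifyLoopA_all_nonneg (xs : List Int) (h : ∀ x ∈ xs, 0 ≤ x) (k : List (List Int)) :
    verifyLoopA k xs = k ++ xs.map (fun x => [x * x, (2 : Int) ^ x.toNat, (Nat.factorial x.toNat : Int)]) := by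
  induction xs generalizing k with
  | nil => simp [verifyLoopA]
  | cons x rest ih =>
      have hx : x ≥ 0 := h x (List.mem_cons_self)
      simp [verifyLoopA, hx, multipleOpA,
        ih (fun y hy => h y (List.mem_cons_of_mem _ hy))]

-- ===== VERDICT =====
theorem verify_array_op_spec : Claim_equal_verify_array_op := by
  intro array _ hpre
  unfold Spec_verify_array_op verify_array_op verify_array_op_alt
  have hany : array.any (fun X => !(X ≥ 0)) = false := by
    simp only [List.any_eq_false, Bool.not_eq_true', decide_eq_false_iff_not]
    intro x hx
    simpa using hpre x hx
  rw [verifyLoopA_all_nonneg array hpre, hany]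
  simp [zip3Rows_map]
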